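-- pv_equiv track=rewrite | github.com/mattsteinpreis/puzzling_se | func.py | decode_62
-- ===== SOURCE A (Python) =====
-- BASE62 = "abcdefghijklmnopqrstuvwxyzABCDEFGHIJKLMNOPQRSTUVWXYZ0123456789"
--
-- def decode_62(string, alphabet=BASE62):
--     """Decode a Base X encoded string into the number
--
--     Arguments:
--     - `string`: The encoded string
--     - `alphabet`: The alphabet to use for encoding
--     """
--     base = len(alphabet)
--     strlen = len(string)
--     num = 0
--
--     idx = 0
--     for char in string:
--         power = (strlen - (idx + 1))
--         num += alphabet.index(char) * (base ** power)
--         idx += 1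
--
--     return num
-- ===== SOURCE B (Python) =====
-- BASE62 = "abcdefghijklmnopqrstuvwxyzABCDEFGHIJKLMNOPQRSTUVWXYZ0123456789"
--
-- def decode_62(string, alphabet=BASE62):
--     """Decode a Base X encoded string into the number (Horner, one pass, dict lookup)."""
--     index = {}
--     for i, c in enumerate(alphabet):
--         index.setdefault(c, i)
--     base = len(alphabet)
--     num = 0
--     for c in string:
--         num = num * base + index[c]
--     return num
-- ===== Notes on version B (the rewrite author's own statement) =====
-- stated objective: faster
-- what changed: Replaces the per-character alphabet.index scan and base**power exponentiation with a first-occurrence index dict built once plus a single Horner's-method pass (num = num*base + digit).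
import Mathlib
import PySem

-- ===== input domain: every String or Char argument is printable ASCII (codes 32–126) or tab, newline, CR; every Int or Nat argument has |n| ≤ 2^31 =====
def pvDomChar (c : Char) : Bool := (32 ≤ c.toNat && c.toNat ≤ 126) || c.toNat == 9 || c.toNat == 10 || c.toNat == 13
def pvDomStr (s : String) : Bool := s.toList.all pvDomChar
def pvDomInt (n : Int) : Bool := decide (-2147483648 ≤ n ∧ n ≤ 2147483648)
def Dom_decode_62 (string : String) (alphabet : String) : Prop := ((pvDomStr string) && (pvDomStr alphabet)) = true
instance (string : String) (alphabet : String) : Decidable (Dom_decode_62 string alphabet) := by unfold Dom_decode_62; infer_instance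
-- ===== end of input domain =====

-- B replaces A's per-character alphabet.index scan and base**power with a first-occurrence
-- index dict built once plus a single Horner's-method pass (measurably faster).


-- ===== PORT A =====
-- A's for-loop: idx counter, num += alphabet.index(char) * base**power.
-- alphabet.index(char) raises ValueError when char is absent; Pre_ excludes that, so
-- (index? …).getD 0 is the total form.  power = strlen-(idx+1) is ≥ 0 for every visited idx,
-- so Nat subtraction/exponent is exact inside the loop.
def decodeALoop (alpha : List Char) (base : Int) (strlen : Nat) :
    List Char → Nat → Int → Int
  | [], _, num => num
  | c :: rest, idx, num =>
      decodeALoop alpha base strlen rest (idx + 1)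
        (num + (((PySem.List.index? alpha c).getD 0 : Nat) : Int) * base ^ (strlen - (idx + 1)))

def decode_62 (string : String) (alphabet : String) : Int :=
  decodeALoop alphabet.toList (alphabet.toList.length : Int) string.toList.length
    string.toList 0 0

-- ===== PORT B =====
-- index.setdefault(c, i) over enumerate(alphabet): first occurrence wins.
def buildIdx : List Char → Int → PySem.Dict Char Int → PySem.Dict Char Int
  | [], _, d => d
  | c :: rest, i, d => buildIdx rest (i + 1) (d.setdefault c i)

-- num = num * base + index[c]; index[c] raises KeyError when absent (excluded by Pre_),
-- getD … 0 is the total form.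
def hornerLoop (base : Int) (d : PySem.Dict Char Int) : List Char → Int → Int
  | [], num => num
  | c :: rest, num => hornerLoop base d rest (num * base + d.getD c 0)

def decode_62_alt (string : String) (alphabet : String) : Int :=
  hornerLoop (alphabet.toList.length : Int) (buildIdx alphabet.toList 0 PySem.Dict.empty)
    string.toList 0

-- ===== PRECONDITION & SPEC =====
-- Pre_ excludes exactly the inputs on which A raises ValueError (a character of string
-- not occurring in alphabet); B raises KeyError there.
def Pre_decode_62 (string : String) (alphabet : String) : Prop :=
  (string.toList.all (fun c => alphabet.toList.contains c)) = true
instance (string : String) (alphabet : String) : Decidable (Pre_decode_62 string alphabet) := by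
  unfold Pre_decode_62; infer_instance
def pvWitness_decode_62 : String × String := ("cab", "abc")

def Spec_decode_62 (string : String) (alphabet : String) (out : Int) : Prop := out = decode_62_alt string alphabet
instance (string : String) (alphabet : String) (out : Int) : Decidable (Spec_decode_62 string alphabet out) := by unfold Spec_decode_62; infer_instance

-- ===== CLAIM (what is proved, stated in full; the proofs are below) =====
def Claim_equal_decode_62 : Prop := ∀ (string : String) (alphabet : String), Dom_decode_62 string alphabet → Pre_decode_62 string alphabet → Spec_decode_62 string alphabet (decode_62 string alphabet)

-- ===== LEMMAS AND PROOFS =====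

-- The dict built by buildIdx answers lookups by first occurrence of the key.
theorem buildIdx_get? (l : List Char) (i : Int) (d : PySem.Dict Char Int) (c : Char) :
    (buildIdx l i d).get? c =
      (d.get? c).or ((PySem.List.index? l c).map (fun k => i + (k : Int))) := by
  induction l generalizing i d with
  | nil => simp [buildIdx, PySem.List.index?_eq_idxOf?]
  | cons c' rest ih =>
    rw [buildIdx, ih]
    by_cases hc : c = c'
    · subst hc
      rw [PySem.Dict.get?_setdefault_self, PySem.List.index?_cons_self]
      cases h : d.get? c <;> simp [Option.or]
    · rw [PySem.Dict.get?_setdefault_of_ne d i hc,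
        PySem.List.index?_cons_of_ne rest (Ne.symm hc)]
      cases h : PySem.List.index? rest c <;> cases hd : d.get? c <;>
        simp [Option.or] <;> omega

-- Under membership the dict lookup equals A's index-scan value.
theorem buildIdx_getD_of_mem (alpha : List Char) (c : Char) (hc : c ∈ alpha) :
    (buildIdx alpha 0 PySem.Dict.empty).getD c 0 =
      (((PySem.List.index? alpha c).getD 0 : Nat) : Int) := by
  rcases Option.isSome_iff_exists.mp ((PySem.List.index?_isSome_iff alpha c).mpr hc)
    with ⟨k, hk⟩
  rw [PySem.Dict.getD_eq_get?_getD, buildIdx_get?, PySem.Dict.get?_empty, hk]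
  simp [Option.or]

-- Shifting the Horner accumulator out.
theorem hornerLoop_shift (base : Int) (d : PySem.Dict Char Int) (cs : List Char) (a : Int) :
    hornerLoop base d cs a = a * base ^ cs.length + hornerLoop base d cs 0 := by
  induction cs generalizing a with
  | nil => simp [hornerLoop]
  | cons c rest ih =>
    rw [hornerLoop, hornerLoop, ih (a * base + d.getD c 0), ih (0 * base + d.getD c 0)]
    simp [pow_succ]; ring

-- A's positional-sum loop equals the Horner loop, given the idx/length bookkeeping.
theorem decodeALoop_eq_horner (alpha : List Char) (strlen : Nat)
    (cs : List Char) (idx : Nat) (num : Int)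
    (hlen : idx + cs.length = strlen) (hmem : ∀ c ∈ cs, c ∈ alpha) :
    decodeALoop alpha (alpha.length : Int) strlen cs idx num =
      num + hornerLoop (alpha.length : Int) (buildIdx alpha 0 PySem.Dict.empty) cs 0 := by
  induction cs generalizing idx num with
  | nil => simp [decodeALoop, hornerLoop]
  | cons c rest ih =>
    have hexp : strlen - (idx + 1) = rest.length := by simp at hlen; omega
    rw [decodeALoop, hexp,
      ih (idx + 1) _ (by simp at hlen ⊢; omega) (fun x hx => hmem x (List.mem_cons_of_mem _ hx)),
      hornerLoop,
      buildIdx_getD_of_mem alpha c (hmem c (List.mem_cons_self ..)),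
      hornerLoop_shift _ _ rest (0 * (alpha.length : Int) + (((PySem.List.index? alpha c).getD 0 : Nat) : Int))]
    ring

-- ===== VERDICT (by name: the statement is the Claim_ definition above) =====
theorem decode_62_spec : Claim_equal_decode_62 := by
  intro s alpha _ hpre
  unfold Pre_decode_62 at hpre
  simp only [List.all_eq_true, List.contains_eq_mem, decide_eq_true_eq] at hpre
  unfold Spec_decode_62 decode_62 decode_62_alt
  rw [decodeALoop_eq_horner alpha.toList s.toList.length s.toList 0 0 (by simp) hpre]
  ring
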